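-- pv_equiv track=rewrite | github.com/vaibhav-jain-dev/learning-algo | problems/200-must-solve/arrays/19-largest-range/similar/02-count-distinct-ranges/python_code.py | count_distinct_ranges
-- ===== SOURCE A (Python) =====
-- from typing import List, Tuple
--
-- def count_distinct_ranges(nums: List[int]) -> int:
--     """
--     Count the number of distinct consecutive ranges.
--
--     Args:
--         nums: List of distinct integers
--
--     Returns:
--         Number of distinct consecutive ranges
--     """
--     if not nums:
--         return 0
--
--     sorted_nums = sorted(set(nums))  # Remove duplicates and sort
--     range_count = 1
--
--     for i in range(1, len(sorted_nums)):
--         if sorted_nums[i] != sorted_nums[i-1] + 1: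
--             range_count += 1
--
--     return range_count
-- ===== SOURCE B (Python) =====
-- def count_distinct_ranges(nums):
--     """Count distinct consecutive ranges: O(n) hash-set pass counting range starts
--     (elements whose predecessor is absent) instead of sort-and-scan."""
--     s = set(nums)
--     return sum(1 for x in s if x - 1 not in s)
-- ===== Notes on version B (the rewrite author's own statement) =====
-- stated objective: faster
-- what changed: B replaces A's sort-then-scan-for-gaps with a single hash-set pass that counts elements whose predecessor (x-1) is absent, i.e. the starts of the ranges.
import Mathlib
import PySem

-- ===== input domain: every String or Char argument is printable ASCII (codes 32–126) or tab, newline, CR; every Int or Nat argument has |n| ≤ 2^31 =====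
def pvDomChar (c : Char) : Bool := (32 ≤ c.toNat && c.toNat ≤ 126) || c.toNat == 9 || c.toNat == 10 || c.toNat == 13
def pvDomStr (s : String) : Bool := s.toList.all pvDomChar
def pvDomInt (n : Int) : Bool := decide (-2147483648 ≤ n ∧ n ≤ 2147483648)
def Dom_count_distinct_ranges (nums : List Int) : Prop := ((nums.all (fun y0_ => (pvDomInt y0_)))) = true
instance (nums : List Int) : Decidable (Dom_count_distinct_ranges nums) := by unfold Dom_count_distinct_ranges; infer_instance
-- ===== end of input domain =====

-- B replaces A's sort-then-scan-for-gaps with a single set pass counting elements whose predecessor is absent (the range starts).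


-- ===== PORT A =====
def count_distinct_ranges (nums : List Int) : Int :=
  if nums = [] then 0
  else
    let sorted_nums := PySem.List.sorted (PySem.Set.ofList nums) (fun x => x) false
    (PySem.List.pyRange 1 (PySem.List.len sorted_nums) 1).foldl
      (fun range_count i =>
        if PySem.List.pyGetD sorted_nums i 0 ≠ PySem.List.pyGetD sorted_nums (i - 1) 0 + 1
        then range_count + 1 else range_count) 1

-- ===== PORT B =====
def count_distinct_ranges_alt (nums : List Int) : Int :=
  let s : PySem.Set Int := PySem.Set.ofList nums
  s.foldl (fun acc x => if !(PySem.Set.contains s (x - 1)) then acc + 1 else acc) 0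

-- ===== PRECONDITION & SPEC =====
def Spec_count_distinct_ranges (nums : List Int) (out : Int) : Prop := out = count_distinct_ranges_alt nums
instance (nums : List Int) (out : Int) : Decidable (Spec_count_distinct_ranges nums out) := by unfold Spec_count_distinct_ranges; infer_instance

-- ===== CLAIM (what is proved, stated in full; the proofs are below) =====
def Claim_equal_count_distinct_ranges : Prop := ∀ (nums : List Int), Dom_count_distinct_ranges nums → Spec_count_distinct_ranges nums (count_distinct_ranges nums)

-- ===== LEMMAS AND PROOFS =====

/-- Structural count of the "breaks" A's index loop counts: one for each adjacent
pair of the sorted dedup list that is not consecutive. -/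
def pvBrk : Int → List Int → Int
  | _, [] => 0
  | a, b :: t => (if b ≠ a + 1 then 1 else 0) + pvBrk b t

/-- A's index loop over `pyRange (k+1) (len xs)` computes `pvBrk` of the suffix `xs.drop k`. -/
lemma pvFold_eq_brk (xs : List Int) :
    ∀ (t : List Int) (k : Nat) (a : Int), xs.drop k = a :: t → ∀ c : Int,
      (PySem.List.pyRange ((k : Int) + 1) (PySem.List.len xs) 1).foldl
        (fun range_count i =>
          if PySem.List.pyGetD xs i 0 ≠ PySem.List.pyGetD xs (i - 1) 0 + 1
          then range_count + 1 else range_count) c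
      = c + pvBrk a t := by
  intro t
  induction t with
  | nil =>
    intro k a h c
    have hk : k + 1 = xs.length := by
      have := congrArg List.length h
      simp [List.length_drop] at this
      omega
    rw [PySem.List.pyRange_one_eq_nil (by simp [PySem.List.len]; omega)]
    simp [pvBrk]
  | cons b t ih =>
    intro k a h c
    have hk : k + 2 ≤ xs.length := by
      have := congrArg List.length h
      simp [List.length_drop] at this
      omega
    have hlt : (k : Int) + 1 < PySem.List.len xs := by
      simp [PySem.List.len]; omega
    rw [PySem.List.pyRange_one_cons hlt]
    have hdropk1 : xs.drop (k + 1) = b :: t := by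
      have : xs.drop (k + 1) = (xs.drop k).drop 1 := by simp [List.drop_drop]
      rw [this, h]; rfl
    have hga : PySem.List.pyGetD xs ((k : Int)) 0 = a := by
      rw [PySem.List.pyGetD_natCast]
      have : xs.getD k 0 = (xs.drop k).getD 0 0 := by
        simp [List.getD_eq_getElem?_getD, List.getElem?_drop]
      rw [this, h]; rfl
    have hgb : PySem.List.pyGetD xs ((k : Int) + 1) 0 = b := by
      have : ((k : Int) + 1) = ((k + 1 : Nat) : Int) := by push_cast; ring
      rw [this, PySem.List.pyGetD_natCast]
      have : xs.getD (k + 1) 0 = (xs.drop (k + 1)).getD 0 0 := by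
        simp [List.getD_eq_getElem?_getD, List.getElem?_drop]
      rw [this, hdropk1]; rfl
    simp only [List.foldl_cons]
    have harg : (k : Int) + 1 - 1 = (k : Int) := by ring
    rw [harg, hga, hgb]
    have hstep : ((k : Int) + 1) + 1 = ((k + 1 : Nat) : Int) + 1 := by push_cast; ring
    rw [hstep, ih (k + 1) b hdropk1]
    by_cases hb : b = a + 1 <;> simp [pvBrk, hb] <;> try ring

/-- On a strictly increasing list, `1 + pvBrk` equals the count of elements whose
predecessor is absent from the list. -/
lemma pvStarts_eq (a : Int) (t : List Int) (hp : (a :: t).Pairwise (· < ·)) :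
    ((List.countP (fun x => !((a :: t).contains (x - 1))) (a :: t) : Nat) : Int)
      = 1 + pvBrk a t := by
  induction t generalizing a with
  | nil => simp [List.countP, List.countP.go, pvBrk]
  | cons b t ih =>
    have hab : a < b := (List.pairwise_cons.1 hp).1 b (by simp)
    have hbt : ∀ y ∈ t, b < y := fun y hy =>
      (List.pairwise_cons.1 (List.pairwise_cons.1 hp).2).1 y hy
    have hp' : (b :: t).Pairwise (· < ·) := (List.pairwise_cons.1 hp).2
    -- a's predecessor is absent
    have hA : ((a :: b :: t).contains (a - 1)) = false := by
      simp only [List.contains_eq_any_beq, List.any_eq_false]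
      intro y hy
      have : a ≤ y := by
        rcases (by simpa using hy : y = a ∨ y = b ∨ y ∈ t) with h | h | h
        · omega
        · omega
        · have := hbt y h; omega
      simp [beq_iff_eq]; omega
    -- b's predecessor in the full list is exactly "b = a + 1"
    have hBfull : ((a :: b :: t).contains (b - 1)) = decide (b = a + 1) := by
      by_cases hb : b = a + 1
      · simp [hb]
      · simp only [List.contains_eq_any_beq, hb]
        apply List.any_eq_false.2
        intro y hy
        have : y = a ∨ y = b ∨ y ∈ t := by simpa using hy
        simp only [beq_iff_eq]
        rcases this with h | h | h
        · omega
        · omega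
        · have := hbt y h; omega
    have hBtail : ((b :: t).contains (b - 1)) = false := by
      simp only [List.contains_eq_any_beq, List.any_eq_false]
      intro y hy
      rcases (by simpa using hy : y = b ∨ y ∈ t) with h | h
      · simp [beq_iff_eq]; omega
      · have := hbt y h; simp [beq_iff_eq]; omega
    -- elements of t see the same membership in both lists
    have hTsame : ∀ x ∈ t, ((a :: b :: t).contains (x - 1)) = ((b :: t).contains (x - 1)) := by
      intro x hx
      have hxb : b < x := hbt x hx
      have h1 : ((x - 1) == a) = false := by simp [beq_iff_eq]; omega
      rw [List.contains_cons, h1, Bool.false_or]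
    have hcongr : List.countP (fun x => !((a :: b :: t).contains (x - 1))) t
        = List.countP (fun x => !((b :: t).contains (x - 1))) t := by
      apply List.countP_congr
      intro x hx
      rw [hTsame x hx]
    have ihb := ih b hp'
    simp only [List.countP_cons, hA, hBfull, hBtail, hcongr] at *
    by_cases hb : b = a + 1 <;> simp [hb, pvBrk] at * <;> omega

-- ===== VERDICT (by name: the statement is the Claim_ definition above) =====
theorem count_distinct_ranges_spec : Claim_equal_count_distinct_ranges := by
  intro nums _
  unfold Spec_count_distinct_ranges count_distinct_ranges count_distinct_ranges_alt
  by_cases hnil : nums = []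
  · simp [hnil, PySem.Set.ofList]
  · simp only [hnil, if_false]
    set s : PySem.Set Int := PySem.Set.ofList nums with hs
    set L := PySem.List.sorted s (fun x => x) false with hL
    have hperm : L.Perm s := PySem.List.sorted_perm s (fun x => x) false
    have hpair : L.Pairwise (· < ·) := PySem.List.sorted_ofList_pairwise_lt nums
    have hLne : L ≠ [] := by
      rw [hL, Ne, PySem.List.sorted_eq_nil_iff]
      intro h
      have : nums.head hnil ∈ s := by
        rw [hs]; exact (PySem.Set.mem_ofList _ _).2 (List.head_mem hnil)
      rw [h] at this; simp at this
    obtain ⟨a, t, hat⟩ := List.exists_cons_of_ne_nil hLne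
    -- B side
    rw [PySem.List.foldl_count_if (fun x => !(PySem.Set.contains s (x - 1))) s 0, zero_add]
    -- A side: fold = 1 + pvBrk a t
    have hA : (PySem.List.pyRange 1 (PySem.List.len L) 1).foldl
        (fun range_count i =>
          if PySem.List.pyGetD L i 0 ≠ PySem.List.pyGetD L (i - 1) 0 + 1
          then range_count + 1 else range_count) 1 = 1 + pvBrk a t := by
      have := pvFold_eq_brk L t 0 a (by simpa using hat) 1
      simpa using this
    rw [hA, ← pvStarts_eq a t (hat ▸ hpair), ← hat]
    have heq : List.countP (fun x => !L.contains (x - 1)) L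
        = List.countP (fun x => !(PySem.Set.contains s (x - 1))) s := by
      rw [List.Perm.countP_eq _ hperm]
      apply List.countP_congr
      intro x hx
      simp [PySem.Set.contains, hperm.mem_iff]
    exact congrArg (fun n : Nat => (n : Int)) heq
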